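-- pv_equiv track=rewrite | github.com/mishrasidhant/stmt_obfuscator | stmt_obfuscator/obfuscation/obfuscator.py | _mask_domain
-- ===== SOURCE A (Python) =====
-- def _mask_domain(domain: str) -> str:
--     """
--     Mask a domain name while preserving structure.
--
--     Args:
--         domain: The domain to mask
--
--     Returns:
--         The masked domain
--     """
--     parts = domain.split('.')
--     masked_parts = []
--
--     for part in parts:
--         if part:
--             masked_part = "X" * len(part)
--             masked_parts.append(masked_part)
--         else:
--             masked_parts.append("")
--
--     return '.'.join(masked_parts)
-- ===== SOURCE B (Python) =====
-- def _mask_domain(domain: str) -> str: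
--     """Mask a domain: every character except the dots becomes 'X'."""
--     return ''.join('X' if c != '.' else '.' for c in domain)
-- ===== Notes on version B (the rewrite author's own statement) =====
-- stated objective: simpler
-- what changed: B replaces the split-into-parts / mask-each-part / rejoin pipeline with a single character-level pass that masks every non-dot character, keeping dots in place.
import Mathlib
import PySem

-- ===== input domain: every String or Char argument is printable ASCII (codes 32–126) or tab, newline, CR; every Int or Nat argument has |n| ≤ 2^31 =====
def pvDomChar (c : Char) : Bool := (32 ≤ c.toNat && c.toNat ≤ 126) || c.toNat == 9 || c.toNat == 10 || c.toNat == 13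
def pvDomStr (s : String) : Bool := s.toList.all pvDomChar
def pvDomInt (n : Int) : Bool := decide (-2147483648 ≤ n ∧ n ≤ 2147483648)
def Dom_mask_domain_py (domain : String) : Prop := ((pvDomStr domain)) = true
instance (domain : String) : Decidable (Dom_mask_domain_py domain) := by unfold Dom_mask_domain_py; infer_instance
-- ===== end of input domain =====

-- B changes A's split/mask/rejoin pipeline into a single character-level map (simpler).

-- ===== PORT A =====
-- parts = domain.split('.'); mask each part with "X" * len(part) (or "" for empty); '.'.join(...)
def mask_domain_py (domain : String) : String :=
  -- domain.split('.') with nonempty separator: exact via PySem.Chars.splitOn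
  let parts : List String :=
    (PySem.Chars.splitOn domain.toList ['.']).map String.ofList
  let masked_parts : List String :=
    parts.foldl (fun acc part =>
      if part ≠ "" then
        acc ++ [String.ofList (List.replicate part.toList.length 'X')]  -- "X" * len(part)
      else
        acc ++ [""]) []
  PySem.Str.join "." masked_parts

-- ===== PORT B =====
-- ''.join('X' if c != '.' else '.' for c in domain)
def mask_domain_py_alt (domain : String) : String :=
  String.ofList (domain.toList.map (fun c => if c ≠ '.' then 'X' else '.'))

-- ===== PRECONDITION & SPEC =====
def Spec_mask_domain_py (domain : String) (out : String) : Prop := out = mask_domain_py_alt domain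
instance (domain : String) (out : String) : Decidable (Spec_mask_domain_py domain out) := by unfold Spec_mask_domain_py; infer_instance

-- ===== CLAIM =====
def Claim_equal_mask_domain_py : Prop := ∀ (domain : String), Dom_mask_domain_py domain → Spec_mask_domain_py domain (mask_domain_py domain)

-- ===== LEMMAS AND PROOFS =====

-- Clean accumulator-free specification of splitting on '.'
def pvSplitAux : List Char → List Char → List (List Char)
  | [], cur => [cur.reverse]
  | c :: rest, cur => if c = '.' then cur.reverse :: pvSplitAux rest [] else pvSplitAux rest (c :: cur)

theorem pvGo_eq (l : List Char) : ∀ (fuel : Nat) (cur : List Char) (acc : List (List Char)),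
    l.length < fuel →
    PySem.Chars.splitOn.go ['.'] fuel l cur acc = acc.reverse ++ pvSplitAux l cur := by
  induction l with
  | nil =>
    intro fuel cur acc h
    match fuel, h with
    | fuel + 1, _ => simp [PySem.Chars.splitOn.go, pvSplitAux]
  | cons c rest ih =>
    intro fuel cur acc h
    match fuel, h with
    | fuel + 1, h =>
      by_cases hc : c = '.'
      · subst hc
        rw [show PySem.Chars.splitOn.go ['.'] (fuel+1) ('.' :: rest) cur acc
              = PySem.Chars.splitOn.go ['.'] fuel rest [] (cur.reverse :: acc) by
            simp [PySem.Chars.splitOn.go, List.isPrefixOf]]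
        rw [ih fuel [] (cur.reverse :: acc) (by simpa using h)]
        simp [pvSplitAux]
      · rw [show PySem.Chars.splitOn.go ['.'] (fuel+1) (c :: rest) cur acc
              = PySem.Chars.splitOn.go ['.'] fuel rest (c :: cur) acc by
            simp [PySem.Chars.splitOn.go, List.isPrefixOf]
            exact fun h' => absurd h'.symm hc]
        rw [ih fuel (c :: cur) acc (by simpa using h)]
        simp [pvSplitAux, hc]

theorem pvSplitOn_eq (cs : List Char) :
    PySem.Chars.splitOn cs ['.'] = pvSplitAux cs [] := by
  unfold PySem.Chars.splitOn
  rw [pvGo_eq cs (cs.length + 1) [] [] (by omega)]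
  simp

theorem pvSplitAux_ne_nil (l cur : List Char) : pvSplitAux l cur ≠ [] := by
  cases l with
  | nil => simp [pvSplitAux]
  | cons c rest =>
    by_cases hc : c = '.' <;> simp [pvSplitAux, hc]
    exact pvSplitAux_ne_nil rest _

theorem pvJoin_cons (q : List Char) (qs : List (List Char)) (h : qs ≠ []) :
    PySem.Chars.join ['.'] (q :: qs) = q ++ '.' :: PySem.Chars.join ['.'] qs := by
  cases qs with
  | nil => exact absurd rfl h
  | cons r rs => simp [PySem.Chars.join, List.intercalate, List.intersperse]

-- the A-side foldl loop produces exactly the per-part masks (the empty branch collapses,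
-- since "X" * 0 = "")
theorem pvFoldl_mask (ps : List String) : ∀ (acc : List String),
    ps.foldl (fun a p =>
        if p ≠ "" then a ++ [String.ofList (List.replicate p.toList.length 'X')] else a ++ [""]) acc
      = acc ++ ps.map (fun p => String.ofList (List.replicate p.toList.length 'X')) := by
  induction ps with
  | nil => simp
  | cons p ps ih =>
    intro acc
    rw [List.foldl_cons, ih, List.map_cons]
    by_cases h : p = ""
    · subst h; simp
    · simp [h]

-- the key computation: joining the masked pieces is the character map
theorem pvJoin_mask (l cur : List Char) :
    PySem.Chars.join ['.'] ((pvSplitAux l cur).map (fun p => List.replicate p.length 'X'))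
      = List.replicate cur.length 'X' ++ l.map (fun c => if c ≠ '.' then 'X' else '.') := by
  induction l generalizing cur with
  | nil => simp [pvSplitAux, PySem.Chars.join, List.intercalate]
  | cons c rest ih =>
    by_cases hc : c = '.'
    · subst hc
      rw [show pvSplitAux ('.' :: rest) cur = cur.reverse :: pvSplitAux rest [] by
        simp [pvSplitAux]]
      rw [List.map_cons,
          pvJoin_cons _ _ (by simp [pvSplitAux_ne_nil]),
          ih []]
      simp
    · rw [show pvSplitAux (c :: rest) cur = pvSplitAux rest (c :: cur) by simp [pvSplitAux, hc]]
      rw [ih (c :: cur)]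
      simp [hc, List.replicate_succ']

-- ===== VERDICT =====
theorem mask_domain_py_spec : Claim_equal_mask_domain_py := by
  intro domain _
  unfold Spec_mask_domain_py mask_domain_py mask_domain_py_alt
  simp only [pvSplitOn_eq]
  rw [pvFoldl_mask, List.nil_append, List.map_map]
  unfold PySem.Str.join
  rw [List.map_map]
  rw [show ((fun s => s.toList) ∘ ((fun p => String.ofList (List.replicate p.toList.length 'X')) ∘ String.ofList))
      = fun (p : List Char) => List.replicate p.length 'X' by
      funext p; simp]
  rw [show ("." : String).toList = ['.'] from rfl]
  rw [pvJoin_mask]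
  simp
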